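-- pv_equiv track=rewrite | github.com/ThomasShanoky/StageM2 | ScriptsPrincipaux/Brouillons/5_ProfilsMutationnels.py | getCombiInOnePatient
-- ===== SOURCE A (Python) =====
-- from itertools import combinations
--
-- def getCombiInOnePatient(PatientsAndMutatedGenes, IdPatient, n):
--     GenesMutatedInThePatient = PatientsAndMutatedGenes[IdPatient]
--     if len(GenesMutatedInThePatient) < n:
--         return []
--
--     Allcombi = []
--     for combi in combinations(GenesMutatedInThePatient, n):
--         Allcombi.append(combi)
--
--     return Allcombi
-- ===== SOURCE B (Python) =====
-- def getCombiInOnePatient(PatientsAndMutatedGenes, IdPatient, n):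
--     genes = PatientsAndMutatedGenes[IdPatient]
--     if n < 0:
--         return []
--     out = []
--     stack = [(0, ())]  # (next position to consider, prefix chosen so far)
--     while stack:
--         i, pre = stack.pop()
--         if len(pre) == n:
--             out.append(pre)
--         elif len(genes) - i >= n - len(pre):
--             stack.append((i + 1, pre))                  # skip genes[i]
--             stack.append((i + 1, pre + (genes[i],)))    # take genes[i]
--     return out
-- ===== Notes on version B (the rewrite author's own statement) =====
-- stated objective: alternative
-- what changed: Replaces the itertools.combinations library call with an explicit-stack DFS that pops (position, prefix) nodes, pruning branches with too few remaining genes, emitting the same tuples in the same lexicographic-by-position order.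
import Mathlib
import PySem

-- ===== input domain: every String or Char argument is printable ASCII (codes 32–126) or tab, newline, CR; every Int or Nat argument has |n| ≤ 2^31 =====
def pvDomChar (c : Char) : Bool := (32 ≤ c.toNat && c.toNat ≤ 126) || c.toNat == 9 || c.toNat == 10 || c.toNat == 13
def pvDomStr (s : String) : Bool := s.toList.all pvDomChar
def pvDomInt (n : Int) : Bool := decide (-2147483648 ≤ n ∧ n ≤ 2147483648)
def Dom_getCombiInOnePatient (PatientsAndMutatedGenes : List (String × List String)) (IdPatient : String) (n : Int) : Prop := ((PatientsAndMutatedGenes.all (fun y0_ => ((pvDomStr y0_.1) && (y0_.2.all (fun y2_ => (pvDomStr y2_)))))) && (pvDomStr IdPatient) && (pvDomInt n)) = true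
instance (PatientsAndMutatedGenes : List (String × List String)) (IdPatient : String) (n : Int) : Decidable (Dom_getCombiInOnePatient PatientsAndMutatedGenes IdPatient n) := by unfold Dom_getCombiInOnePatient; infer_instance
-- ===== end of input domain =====

-- B replaces the itertools.combinations call with an explicit-stack DFS over (position, prefix)
-- nodes that prunes branches with too few remaining genes; same return value, alternative algorithm.

-- ===== PORT A =====
-- itertools.combinations(pool, r) ported as the standard lexicographic-by-position recursion.
def pyCombinations : List String → Nat → List (List String)
  | _, 0 => [[]]
  | [], _ + 1 => []
  | x :: rest, r + 1 =>
      ((pyCombinations rest r).map (fun c => x :: c)) ++ pyCombinations rest (r + 1)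

def getCombiInOnePatient (PatientsAndMutatedGenes : List (String × List String)) (IdPatient : String) (n : Int) : List (List String) :=
  -- GenesMutatedInThePatient = PatientsAndMutatedGenes[IdPatient]; KeyError (lookup = none) is excluded by Pre_
  let genes := ((PySem.Dict.mk PatientsAndMutatedGenes).get? IdPatient).getD []
  if (genes.length : Int) < n then []
  else pyCombinations genes n.toNat   -- n < 0 (itertools ValueError) is excluded by Pre_

-- ===== PORT B =====
-- the while loop of Source B: pop (i, pre); emit full prefixes; otherwise, if enough genes remain,
-- push the skip node then the take node (so the take node is processed first).
-- termination helpers for bRun's stack measure (cited in decreasing_by)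
lemma bRun_wkey1 (L i s : Nat) : s < 3 ^ (L - i) + s := by
  have := pow_pos (show 0 < 3 by norm_num) (L - i); omega

lemma bRun_wkey2 (L i s : Nat) (h : i < L) :
    3 ^ (L - (i + 1)) + (3 ^ (L - (i + 1)) + s) < 3 ^ (L - i) + s := by
  have hk : L - i = (L - (i + 1)) + 1 := by omega
  have h2 : 3 ^ (L - i) = 3 * 3 ^ (L - (i + 1)) := by rw [hk, pow_succ]; ring
  have h3 := pow_pos (show 0 < 3 by norm_num) (L - (i + 1))
  omega

def bRun (genes : List String) (n : Int) : List (Nat × List String) → List (List String)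
  | [] => []
  | (i, pre) :: rest =>
      if (pre.length : Int) = n then pre :: bRun genes n rest
      else if (genes.length : Int) - (i : Int) ≥ n - (pre.length : Int) then
        if h : i < genes.length then
          bRun genes n ((i + 1, pre ++ [genes[i]]) :: (i + 1, pre) :: rest)
        else bRun genes n rest   -- unreachable totalization guard (Python would index genes[i] here; never hit under Pre_)
      else bRun genes n rest
  termination_by stack => (stack.map (fun p => 3 ^ (genes.length - p.1))).sum
  decreasing_by
  all_goals simp only [List.map_cons, List.sum_cons]
  · exact bRun_wkey1 _ _ _
  · exact bRun_wkey2 _ _ _ h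
  · exact bRun_wkey1 _ _ _
  · exact bRun_wkey1 _ _ _

def getCombiInOnePatient_alt (PatientsAndMutatedGenes : List (String × List String)) (IdPatient : String) (n : Int) : List (List String) :=
  let genes := ((PySem.Dict.mk PatientsAndMutatedGenes).get? IdPatient).getD []
  if n < 0 then []
  else bRun genes n [(0, [])]

-- ===== PRECONDITION & SPEC =====
-- Pre_ excludes exactly the inputs where A raises: a missing patient id (KeyError) and n < 0
-- (itertools.combinations raises ValueError on negative r).
def Pre_getCombiInOnePatient (PatientsAndMutatedGenes : List (String × List String)) (IdPatient : String) (n : Int) : Prop :=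
  ((PySem.Dict.mk PatientsAndMutatedGenes).get? IdPatient).isSome = true ∧ 0 ≤ n
instance (PatientsAndMutatedGenes : List (String × List String)) (IdPatient : String) (n : Int) : Decidable (Pre_getCombiInOnePatient PatientsAndMutatedGenes IdPatient n) := by unfold Pre_getCombiInOnePatient; infer_instance

def pvWitness_getCombiInOnePatient : (List (String × List String)) × String × Int :=
  ([("p1", ["g1", "g2", "g3"])], "p1", 2)

def Spec_getCombiInOnePatient (PatientsAndMutatedGenes : List (String × List String)) (IdPatient : String) (n : Int) (out : List (List String)) : Prop := out = getCombiInOnePatient_alt PatientsAndMutatedGenes IdPatient n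
instance (PatientsAndMutatedGenes : List (String × List String)) (IdPatient : String) (n : Int) (out : List (List String)) : Decidable (Spec_getCombiInOnePatient PatientsAndMutatedGenes IdPatient n out) := by unfold Spec_getCombiInOnePatient; infer_instance

-- ===== CLAIM (what is proved, stated in full; the proofs are below) =====
def Claim_equal_getCombiInOnePatient : Prop := ∀ (PatientsAndMutatedGenes : List (String × List String)) (IdPatient : String) (n : Int), Dom_getCombiInOnePatient PatientsAndMutatedGenes IdPatient n → Pre_getCombiInOnePatient PatientsAndMutatedGenes IdPatient n → Spec_getCombiInOnePatient PatientsAndMutatedGenes IdPatient n (getCombiInOnePatient PatientsAndMutatedGenes IdPatient n)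

-- ===== LEMMAS AND PROOFS =====

-- combinations of a pool shorter than r are empty
lemma pyCombinations_short : ∀ (xs : List String) (k : Nat), xs.length < k → pyCombinations xs k = [] := by
  intro xs
  induction xs with
  | nil => intro k hk; cases k with
    | zero => omega
    | succ k => simp [pyCombinations]
  | cons x rest ih =>
    intro k hk
    cases k with
    | zero => omega
    | succ k =>
      simp only [pyCombinations]
      rw [ih k (by simp at hk; omega), ih (k + 1) (by simp at hk; omega)]
      simp

-- the stack machine computes, node by node, the recursive combinations of the remaining suffix
lemma bRun_eq (genes : List String) (n : Int) (hn : 0 ≤ n) :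
    ∀ stack : List (Nat × List String),
      (∀ p ∈ stack, (p.2.length : Int) ≤ n) →
      bRun genes n stack =
        stack.flatMap (fun p => (pyCombinations (genes.drop p.1) (n.toNat - p.2.length)).map (fun c => p.2 ++ c)) := by
  intro stack
  induction stack using bRun.induct genes n with
  | case1 => intro _; simp [bRun]
  | case2 i pre rest heq ih =>
    intro hw
    have hrest : ∀ p ∈ rest, (p.2.length : Int) ≤ n := fun p hp => hw p (by simp [hp])
    rw [bRun, if_pos heq, ih hrest]
    have hz : n.toNat - pre.length = 0 := by omega
    simp [hz, pyCombinations]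
  | case3 i pre rest hne hge h ih =>
    intro hw
    have hpre : (pre.length : Int) ≤ n := hw (i, pre) (by simp)
    have hlt : (pre.length : Int) < n := lt_of_le_of_ne hpre hne
    have hw' : ∀ p ∈ ((i + 1, pre ++ [genes[i]]) :: (i + 1, pre) :: rest), (p.2.length : Int) ≤ n := by
      intro p hp
      simp only [List.mem_cons] at hp
      rcases hp with h1 | h1 | h1
      · subst h1; simp; omega
      · subst h1; exact hpre
      · exact hw p (by simp [h1])
    rw [bRun, if_neg hne, if_pos hge, dif_pos h, ih hw']
    -- rewrite the head contribution
    have hdrop : genes.drop i = genes[i] :: genes.drop (i + 1) := List.drop_eq_getElem_cons h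
    have hk : n.toNat - pre.length = (n.toNat - (pre ++ [genes[i]]).length) + 1 := by
      simp only [List.length_append, List.length_cons, List.length_nil]
      omega
    rw [List.flatMap_cons, List.flatMap_cons, List.flatMap_cons]
    rw [hdrop, hk, pyCombinations]
    have hk2 : n.toNat - (pre ++ [genes[i]]).length + 1 = n.toNat - pre.length := by omega
    rw [hk2]
    simp [Function.comp_def, List.append_assoc]
  | case4 i pre rest hne hge hnot ih =>
    -- dead branch: hge with pre.length < n forces i < genes.length
    intro hw
    have hpre : (pre.length : Int) ≤ n := hw (i, pre) (by simp)
    have hlt : (pre.length : Int) < n := lt_of_le_of_ne hpre hne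
    exfalso
    have : (i : Int) < (genes.length : Int) := by omega
    exact hnot (by exact_mod_cast this)
  | case5 i pre rest hne hlt ih =>
    intro hw
    have hrest : ∀ p ∈ rest, (p.2.length : Int) ≤ n := fun p hp => hw p (by simp [hp])
    rw [bRun, if_neg hne, if_neg hlt, ih hrest]
    have hpre : (pre.length : Int) ≤ n := hw (i, pre) (by simp)
    have hshort : (genes.drop i).length < n.toNat - pre.length := by
      simp only [List.length_drop]
      omega
    rw [List.flatMap_cons, pyCombinations_short _ _ hshort]
    simp

-- ===== VERDICT (by name: the statement is the Claim_ definition above) =====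
theorem getCombiInOnePatient_spec : Claim_equal_getCombiInOnePatient := by
  intro pm id n _ hpre
  obtain ⟨hkey, hn⟩ := hpre
  unfold Spec_getCombiInOnePatient getCombiInOnePatient getCombiInOnePatient_alt
  simp only
  set genes := ((PySem.Dict.mk pm).get? id).getD [] with hg
  rw [if_neg (by omega : ¬ n < 0)]
  rw [bRun_eq genes n hn [(0, [])] (by intro p hp; simp at hp; subst hp; simpa using hn)]
  simp only [List.flatMap_cons, List.flatMap_nil, List.drop_zero, List.length_nil,
    Nat.sub_zero, List.append_nil, List.nil_append]
  by_cases hlen : (genes.length : Int) < n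
  · rw [if_pos hlen, pyCombinations_short genes n.toNat (by omega)]
    simp
  · rw [if_neg hlen]
    simp
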